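-- pv_equiv track=rewrite | github.com/ErickKramer/rasa_nlu_utils | sentences_generators/find_intention.py | generate_find_sentences
-- ===== SOURCE A (Python) =====
-- def generate_find_sentences(names, intros):
--     '''
--         Generate sentences for the find intention.
--
--         Args:
--         - names: List of names
--         - intros: List of intros
--
--         Return:
--         - list of sentences
--     '''
--
--     tasks_find = []
--     tasks_find_ = []
--
--     tasks_find_.append(['find [' + name + '](name)' for name in names])
--     tasks_find_.append(['look for [' + name + '](name)' for name in names])
--     tasks_find_.append(['locate [' + name + '](name)' for name in names])
--     tasks_find_.append(['spot [' + name + '](name)' for name in names])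
--
--     tasks_find_.append([ intro + ' find [' + name + '](name)' for intro in intros for name in names])
--     tasks_find_.append([ intro  +  ' look for [' + name + '](name)' for intro in intros  for name in names])
--     tasks_find_.append([ intro  +  ' locate [' + name + '](name)' for intro in intros  for name in names])
--     tasks_find_.append([ intro  +  ' spot [' + name + '](name)' for intro in intros  for name in names])
--
--     tasks_find_.append(['find [' + name + '](name)' + ' [' + name + '](name)' for name in names])
--     tasks_find_.append(['look for [' + name + '](name)' + ' [' + name + '](name)' for name in names])
--     tasks_find_.append(['locate [' + name + '](name)' + ' [' + name + '](name)' for name in names])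
--     tasks_find_.append(['spot [' + name + '](name)' + ' [' + name + '](name)' for name in names])
--
--     tasks_find_.append(['find [' + name + '](name)' + ' [' + name + '](name)' + ' [' + name + '](name)' for name in names])
--     tasks_find_.append(['look for [' + name + '](name)' + ' [' + name + '](name)' + ' [' + name + '](name)' for name in names])
--     tasks_find_.append(['locate [' + name + '](name)' + ' [' + name + '](name)' + ' [' + name + '](name)' for name in names])
--     tasks_find_.append(['spot [' + name + '](name)' + ' [' + name + '](name)' + ' [' + name + '](name)'  for name in names])
--
--     tasks_find = [item for sublist in tasks_find_ for item in sublist]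
--     print ("number of 'find' sentences", len(tasks_find))
--
--     return tasks_find
-- ===== SOURCE B (Python) =====
-- def generate_find_sentences(names, intros):
--     '''
--         Generate sentences for the find intention (template-table version).
--     '''
--     verbs = ['find', 'look for', 'locate', 'spot']
--     templates = ([(verb, 1) for verb in verbs]
--                  + [(intro + ' ' + verb, 1) for verb in verbs for intro in intros]
--                  + [(verb, 2) for verb in verbs]
--                  + [(verb, 3) for verb in verbs])
--     tasks_find = [prefix + ' ' + ' '.join(['[' + name + '](name)'] * rep)
--                   for prefix, rep in templates
--                   for name in names]
--     print("number of 'find' sentences", len(tasks_find))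
--     return tasks_find
-- ===== Notes on version B (the rewrite author's own statement) =====
-- stated objective: simpler
-- what changed: Replaces sixteen copy-pasted comprehensions and a final flatten by a two-phase design: first materialize a table of (prefix, repetition) templates (verbs, intro+verb combinations, doubled and tripled variants), then emit all sentences in one cross-product pass of templates x names, building the repeated '[name](name)' unit with ' '.join.
import Mathlib
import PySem

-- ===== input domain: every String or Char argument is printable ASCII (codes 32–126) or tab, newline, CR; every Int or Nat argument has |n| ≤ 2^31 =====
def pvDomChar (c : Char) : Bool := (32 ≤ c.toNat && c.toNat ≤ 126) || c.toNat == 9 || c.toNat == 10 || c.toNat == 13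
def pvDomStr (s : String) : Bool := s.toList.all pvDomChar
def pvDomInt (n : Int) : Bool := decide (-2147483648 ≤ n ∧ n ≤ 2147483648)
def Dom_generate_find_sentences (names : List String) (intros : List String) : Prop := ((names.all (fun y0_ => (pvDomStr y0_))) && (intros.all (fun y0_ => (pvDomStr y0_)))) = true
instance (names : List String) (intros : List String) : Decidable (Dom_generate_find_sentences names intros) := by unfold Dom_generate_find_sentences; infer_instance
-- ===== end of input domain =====

-- B builds a (prefix, repetition) template table first and then emits every sentence in
-- one templates-by-names cross-product pass (objective: simpler). Equivalence is about the
-- return value; both programs also print the sentence count (a side effect not modelled here).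

-- ===== PORT A =====
def generate_find_sentences (names : List String) (intros : List String) : List String :=
  let tasks_find_ : List (List String) := [
    names.map (fun name => "find [" ++ name ++ "](name)"),
    names.map (fun name => "look for [" ++ name ++ "](name)"),
    names.map (fun name => "locate [" ++ name ++ "](name)"),
    names.map (fun name => "spot [" ++ name ++ "](name)"),
    intros.flatMap (fun intro => names.map (fun name => intro ++ " find [" ++ name ++ "](name)")),
    intros.flatMap (fun intro => names.map (fun name => intro ++ " look for [" ++ name ++ "](name)")),
    intros.flatMap (fun intro => names.map (fun name => intro ++ " locate [" ++ name ++ "](name)")),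
    intros.flatMap (fun intro => names.map (fun name => intro ++ " spot [" ++ name ++ "](name)")),
    names.map (fun name => "find [" ++ name ++ "](name)" ++ " [" ++ name ++ "](name)"),
    names.map (fun name => "look for [" ++ name ++ "](name)" ++ " [" ++ name ++ "](name)"),
    names.map (fun name => "locate [" ++ name ++ "](name)" ++ " [" ++ name ++ "](name)"),
    names.map (fun name => "spot [" ++ name ++ "](name)" ++ " [" ++ name ++ "](name)"),
    names.map (fun name => "find [" ++ name ++ "](name)" ++ " [" ++ name ++ "](name)" ++ " [" ++ name ++ "](name)"),
    names.map (fun name => "look for [" ++ name ++ "](name)" ++ " [" ++ name ++ "](name)" ++ " [" ++ name ++ "](name)"),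
    names.map (fun name => "locate [" ++ name ++ "](name)" ++ " [" ++ name ++ "](name)" ++ " [" ++ name ++ "](name)"),
    names.map (fun name => "spot [" ++ name ++ "](name)" ++ " [" ++ name ++ "](name)" ++ " [" ++ name ++ "](name)")]
  tasks_find_.flatMap (fun sublist => sublist)

-- ===== PORT B =====
def generate_find_sentences_alt (names : List String) (intros : List String) : List String :=
  let verbs : List String := ["find", "look for", "locate", "spot"]
  let templates : List (String × Nat) :=
    verbs.map (fun verb => (verb, 1))
    ++ verbs.flatMap (fun verb => intros.map (fun intro => (intro ++ " " ++ verb, 1)))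
    ++ verbs.map (fun verb => (verb, 2))
    ++ verbs.map (fun verb => (verb, 3))
  templates.flatMap (fun t =>
    names.map (fun name =>
      t.1 ++ " " ++ PySem.Str.join " " (List.replicate t.2 ("[" ++ name ++ "](name)"))))

-- ===== PRECONDITION & SPEC =====
def Spec_generate_find_sentences (names : List String) (intros : List String) (out : List String) : Prop := out = generate_find_sentences_alt names intros
instance (names : List String) (intros : List String) (out : List String) : Decidable (Spec_generate_find_sentences names intros out) := by unfold Spec_generate_find_sentences; infer_instance

-- ===== CLAIM (what is proved, stated in full; the proofs are below) =====
def Claim_equal_generate_find_sentences : Prop := ∀ (names : List String) (intros : List String), Dom_generate_find_sentences names intros → Spec_generate_find_sentences names intros (generate_find_sentences names intros)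

-- ===== LEMMAS AND PROOFS =====
theorem pv_main (names intros : List String) :
    generate_find_sentences names intros = generate_find_sentences_alt names intros := by
  apply (List.map_injective_iff.mpr (fun a b h => String.toList_inj.mp h))
  unfold generate_find_sentences generate_find_sentences_alt
  simp [List.map_flatMap, List.flatMap_map, List.flatMap_append, List.map_map,
    List.replicate_succ, List.replicate_zero, Function.comp_def, PySem.Str.join, PySem.Chars.join,
    List.intercalate, List.intersperse, List.flatten, List.append_assoc]

-- ===== VERDICT (by name: the statement is the Claim_ definition above) =====
theorem generate_find_sentences_spec : Claim_equal_generate_find_sentences := by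
  intro names intros _
  unfold Spec_generate_find_sentences
  exact pv_main names intros
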